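-- pv_equiv track=rewrite | github.com/Herbert-Haase/ain_programs | ain3/stochastik/hw3/paging.py | lru_hits
-- ===== SOURCE A (Python) =====
-- from collections import OrderedDict
--
-- def lru_hits(pages, capacity):
--     cache = OrderedDict()
--     hits = 0
--     for p in pages:
--         if p in cache:
--             hits += 1
--             cache.move_to_end(p)
--         else:
--             if len(cache) >= capacity:
--                 cache.popitem(last=False)
--             cache[p] = True
--     return hits
-- ===== SOURCE B (Python) =====
-- def lru_hits(pages, capacity):
--     hits = 0
--     for i, p in enumerate(pages):
--         distinct = set()
--         for q in reversed(pages[:i]):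
--             if q == p:
--                 if len(distinct) < capacity:
--                     hits += 1
--                 break
--             distinct.add(q)
--     return hits
-- ===== Notes on version B (the rewrite author's own statement) =====
-- stated objective: alternative
-- what changed: B drops the LRU-cache simulation (OrderedDict with move_to_end/popitem) entirely and counts hits by the classic reuse-distance criterion: for each access it scans backwards to the previous occurrence of the page, collecting the distinct pages in between, and counts a hit iff fewer than `capacity` distinct pages occurred since.
-- crash fix: On capacity <= 0 with nonempty pages A raises KeyError (popitem from an empty OrderedDict at the first miss); B returns 0, since no access can be a hit with non-positive capacity. — e.g. on lru_hits([1, 1], 0): A raises KeyError, B returns 0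
import Mathlib
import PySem

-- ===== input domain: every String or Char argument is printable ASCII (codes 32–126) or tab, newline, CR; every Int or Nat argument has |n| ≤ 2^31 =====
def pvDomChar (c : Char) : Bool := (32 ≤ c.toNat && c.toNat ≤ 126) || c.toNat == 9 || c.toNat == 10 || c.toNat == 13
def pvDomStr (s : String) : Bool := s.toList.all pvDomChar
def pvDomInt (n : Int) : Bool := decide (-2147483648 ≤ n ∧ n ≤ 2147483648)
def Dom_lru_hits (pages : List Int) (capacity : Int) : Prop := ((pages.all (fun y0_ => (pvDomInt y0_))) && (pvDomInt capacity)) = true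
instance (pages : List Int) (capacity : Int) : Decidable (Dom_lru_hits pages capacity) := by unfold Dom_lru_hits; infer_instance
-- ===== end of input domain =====

-- B replaces A's LRU-cache simulation by the classic reuse-distance criterion (an access is a
-- hit iff fewer than `capacity` distinct pages occur after the previous access of the same page);
-- objective: alternative (a genuinely different algorithm; no speed claim, B's backward scans
-- can cost more than A's cache updates on long traces).

-- ===== PORT A =====
-- loop body of A's `for p in pages`; `cache.move_to_end(p)` is erase-then-insert (exact: the key
-- moves to the end), `cache.popitem(last=False)` is dropping the first item of the items list
-- (exact when the cache is nonempty; Pre_ excludes the inputs where Python raises KeyError there).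
def lruStep (capacity : Int) (st : PySem.Dict Int Bool × Int) (p : Int) : PySem.Dict Int Bool × Int :=
  if st.1.contains p then
    ((st.1.erase p).insert p true, st.2 + 1)
  else
    (if capacity ≤ (st.1.size : Int) then (PySem.Dict.mk st.1.items.tail).insert p true
     else st.1.insert p true, st.2)

def lru_hits (pages : List Int) (capacity : Int) : Int :=
  (pages.foldl (lruStep capacity) (PySem.Dict.empty, 0)).2

-- ===== PORT B =====
-- inner `for q in reversed(pages[:i])` loop with its break, returning the hit contribution (0/1)
def lruScanBack (p : Int) (capacity : Int) : List Int → PySem.Set Int → Int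
  | [], _ => 0
  | q :: r, distinct =>
    if q = p then (if PySem.Set.len distinct < capacity then 1 else 0)
    else lruScanBack p capacity r (PySem.Set.add distinct q)

def lru_hits_alt (pages : List Int) (capacity : Int) : Int :=
  (PySem.List.enumerate pages 0).foldl
    (fun hits ip =>
      hits + lruScanBack ip.2 capacity (PySem.List.slice pages none (some ip.1)).reverse PySem.Set.empty)
    0

-- ===== PRECONDITION & SPEC =====
-- Pre_ excludes capacity ≤ 0 with nonempty pages: there A raises KeyError (popitem on an empty
-- OrderedDict at the first miss); B returns 0 there (see Raises_ below).
def Pre_lru_hits (pages : List Int) (capacity : Int) : Prop := 1 ≤ capacity ∨ pages = []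
instance (pages : List Int) (capacity : Int) : Decidable (Pre_lru_hits pages capacity) := by
  unfold Pre_lru_hits; infer_instance

def pvWitness_lru_hits : List Int × Int := ([1, 2, 1, 3, 2], 2)

-- On capacity ≤ 0 with nonempty pages A raises KeyError (popitem from an empty OrderedDict);
-- B returns 0 (no access can be a hit with a non-positive capacity).
def Raises_lru_hits (pages : List Int) (capacity : Int) : Prop := capacity ≤ 0 ∧ pages ≠ []
instance (pages : List Int) (capacity : Int) : Decidable (Raises_lru_hits pages capacity) := by
  unfold Raises_lru_hits; infer_instance
def pvRaiseWitness_lru_hits : List Int × Int := ([1, 1], 0)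
def pvRaiseWitnessOut_lru_hits : Int := 0

def Spec_lru_hits (pages : List Int) (capacity : Int) (out : Int) : Prop := out = lru_hits_alt pages capacity
instance (pages : List Int) (capacity : Int) (out : Int) : Decidable (Spec_lru_hits pages capacity out) := by unfold Spec_lru_hits; infer_instance

-- ===== CLAIM (what is proved, stated in full; the proofs are below) =====
def Claim_equal_lru_hits : Prop := ∀ (pages : List Int) (capacity : Int), Dom_lru_hits pages capacity → Pre_lru_hits pages capacity → Spec_lru_hits pages capacity (lru_hits pages capacity)
def Claim_raises_lru_hits : Prop := (∀ (pages : List Int) (capacity : Int), Dom_lru_hits pages capacity → Raises_lru_hits pages capacity → ¬ Pre_lru_hits pages capacity) ∧ (Dom_lru_hits (pvRaiseWitness_lru_hits.1) (pvRaiseWitness_lru_hits.2) ∧ Raises_lru_hits (pvRaiseWitness_lru_hits.1) (pvRaiseWitness_lru_hits.2) ∧ lru_hits_alt (pvRaiseWitness_lru_hits.1) (pvRaiseWitness_lru_hits.2) = pvRaiseWitnessOut_lru_hits)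

-- ===== LEMMAS AND PROOFS =====

-- the cache A maintains after history `h` (reversed prefix, most recent first): its keys,
-- oldest first, are the reverse of the first `capacity` distinct elements of `h`
def lruKeys (capacity : Int) (h : List Int) : List Int :=
  (PySem.List.dedup h).take capacity.toNat

def lruCache (capacity : Int) (h : List Int) : PySem.Dict Int Bool :=
  PySem.Dict.mk ((lruKeys capacity h).reverse.map (fun k => (k, true)))

-- hit count of `rest` processed after history `h`
def lruCnt (capacity : Int) (h : List Int) : List Int → Int
  | [] => 0
  | p :: r => (if p ∈ lruKeys capacity h then 1 else 0) + lruCnt capacity (p :: h) r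

-- folding Set.add from any set appends the new distinct elements
theorem foldl_add_aux : ∀ (n : Nat) (l : List Int), l.length ≤ n → ∀ (s : List Int),
    List.foldl PySem.Set.add s l = s ++ PySem.Set.ofList (l.filter (fun y => !s.contains y)) := by
  intro n
  induction n with
  | zero =>
    intro l hl s
    have : l = [] := List.eq_nil_of_length_eq_zero (Nat.le_zero.mp hl)
    subst this; simp [PySem.Set.ofList, PySem.Set.empty]
  | succ n IH =>
    intro l hl s
    match l with
    | [] => simp [PySem.Set.ofList, PySem.Set.empty]
    | x :: l =>
      simp only [List.length_cons, Nat.succ_le_succ_iff] at hl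
      simp only [List.foldl_cons, List.filter_cons]
      by_cases hx : s.contains x
      · rw [show PySem.Set.add s x = s from by unfold PySem.Set.add PySem.Set.contains; rw [hx]; simp]
        simp only [hx, Bool.not_true, Bool.false_eq_true, if_false]
        exact IH l hl s
      · rw [Bool.not_eq_true] at hx
        rw [show PySem.Set.add s x = s ++ [x] from by unfold PySem.Set.add PySem.Set.contains; rw [hx]; simp]
        rw [IH l hl (s ++ [x])]
        simp only [hx, Bool.not_false, if_pos]
        have h2 : PySem.Set.ofList (x :: l.filter (fun y => !s.contains y))
            = [x] ++ PySem.Set.ofList ((l.filter (fun y => !s.contains y)).filter (fun y => !([x].contains y))) := by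
          show List.foldl PySem.Set.add PySem.Set.empty _ = _
          simp only [List.foldl_cons]
          rw [show PySem.Set.add PySem.Set.empty x = [x] from rfl]
          exact IH (l.filter (fun y => !s.contains y)) (le_trans (List.length_filter_le _ _) hl) [x]
        rw [h2, List.filter_filter]
        have h4 : (l.filter (fun y => !([x].contains y) && !s.contains y))
            = (l.filter (fun y => !(s ++ [x]).contains y)) := by
          apply List.filter_congr; intro y _
          simp [Bool.not_or, Bool.and_comm]
        rw [h4]; simp

theorem foldl_add_eq_append (l s : List Int) :
    List.foldl PySem.Set.add s l = s ++ PySem.Set.ofList (l.filter (fun y => !s.contains y)) :=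
  foldl_add_aux l.length l le_rfl s

theorem dedup_cons (x : Int) (l : List Int) :
    PySem.List.dedup (x :: l) = x :: (PySem.List.dedup (l.filter (fun y => y ≠ x))) := by
  show List.foldl PySem.Set.add PySem.Set.empty _ = _
  simp only [List.foldl_cons]
  rw [show PySem.Set.add PySem.Set.empty x = [x] from rfl, foldl_add_eq_append]
  have : (l.filter (fun y => !([x].contains y))) = l.filter (fun y => y ≠ x) := by
    apply List.filter_congr; intro y _; simp
  rw [this]; rfl

theorem dedup_filter_aux : ∀ (n : Nat) (l : List Int), l.length ≤ n → ∀ (q : Int → Bool),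
    PySem.List.dedup (l.filter q) = (PySem.List.dedup l).filter q := by
  intro n
  induction n with
  | zero =>
    intro l hl q
    have : l = [] := List.eq_nil_of_length_eq_zero (Nat.le_zero.mp hl)
    subst this; rfl
  | succ n IH =>
    intro l hl q
    match l with
    | [] => rfl
    | x :: l =>
      simp only [List.length_cons, Nat.succ_le_succ_iff] at hl
      rw [dedup_cons x l, List.filter_cons]
      by_cases hq : q x
      · simp only [hq, if_pos]
        rw [dedup_cons x (l.filter q), List.filter_cons, hq]
        simp only [if_pos]
        rw [← IH (l.filter (fun y => y ≠ x)) (le_trans (List.length_filter_le _ _) hl) q]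
        congr 2
        rw [List.filter_filter, List.filter_filter]
        apply List.filter_congr; intro y _; exact Bool.and_comm _ _
      · simp only [hq, Bool.false_eq_true, if_false, List.filter_cons]
        rw [← IH (l.filter (fun y => y ≠ x)) (le_trans (List.length_filter_le _ _) hl) q]
        congr 1
        rw [List.filter_filter]
        have : l.filter (fun y => q y && decide (y ≠ x)) = l.filter q := by
          rw [show (fun (y : Int) => q y && decide (y ≠ x)) = (fun y => decide (y ≠ x) && q y) from funext (fun y => Bool.and_comm _ _), ← List.filter_filter]
          apply List.filter_eq_self.mpr
          intro y hy
          have hyq : q y = true := List.of_mem_filter hy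
          simp only [decide_eq_true_eq]
          intro h; subst h; rw [hyq] at hq; exact hq rfl
        rw [this]

theorem mem_take_middle (p : Int) (A t : List Int) (k : Nat) (hA : p ∉ A) :
    p ∈ (A ++ p :: t).take k ↔ A.length < k := by
  rw [List.take_append, List.mem_append]
  constructor
  · rintro (h | h)
    · exact absurd (List.mem_of_mem_take h) hA
    · by_contra hk
      have : k - A.length = 0 := by omega
      rw [this] at h; simp at h
  · intro hk
    right
    have : k - A.length = (k - A.length - 1) + 1 := by omega
    rw [this, List.take_succ_cons]
    exact List.mem_cons_self
theorem take_filter_of_not_mem_take (p : Int) : ∀ (L : List Int) (k : Nat), p ∉ L.take k →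
    (L.filter (fun y => y ≠ p)).take k = L.take k := by
  intro L
  induction L with
  | nil => simp
  | cons x L IH =>
    intro k hk
    match k with
    | 0 => simp
    | k + 1 =>
      rw [List.take_succ_cons] at hk
      simp only [List.mem_cons, not_or] at hk
      rw [List.filter_cons]
      have hx : (decide (x ≠ p)) = true := by simp; exact fun h => hk.1 h.symm
      rw [hx]
      simp only [if_pos, List.take_succ_cons]
      rw [IH k hk.2]

theorem take_filter_of_mem_take (p : Int) : ∀ (L : List Int) (k : Nat), L.Nodup → p ∈ L.take k →
    (L.filter (fun y => y ≠ p)).take (k - 1) = (L.take k).filter (fun y => y ≠ p) := by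
  intro L
  induction L with
  | nil => simp
  | cons x L IH =>
    intro k hnd hk
    match k with
    | 0 => simp at hk
    | k + 1 =>
      rw [List.take_succ_cons, List.mem_cons] at hk
      rw [List.nodup_cons] at hnd
      rcases hk with hk | hk
      · subst hk
        rw [List.filter_cons]
        simp only [ne_eq, decide_not, decide_true, Bool.not_true, Bool.false_eq_true, if_false,
          List.take_succ_cons, Nat.add_sub_cancel]
        have : L.filter (fun y => !decide (y = p)) = L := by
          apply List.filter_eq_self.mpr
          intro y hy; simp; intro h; subst h; exact hnd.1 hy
        rw [this]
        have h2 : (L.take k).filter (fun y => !decide (y = p)) = L.take k := by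
          apply List.filter_eq_self.mpr
          intro y hy; simp; intro h; subst h; exact hnd.1 (List.mem_of_mem_take hy)
        simp [h2]
      · have hxp : x ≠ p := by
          intro h; subst h; exact hnd.1 (List.mem_of_mem_take hk)
        rw [List.filter_cons]
        have hx : (decide (x ≠ p)) = true := by simpa using hxp
        rw [hx]
        simp only [if_pos, Nat.add_sub_cancel, List.take_succ_cons]
        match k with
        | 0 => simp at hk
        | k + 1 =>
          rw [List.take_succ_cons]
          have := IH (k + 1) hnd.2 hk
          rw [Nat.add_sub_cancel] at this
          rw [this, List.filter_cons, hx]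
          simp

-- the hit criterion: p is cached after history h iff p occurs in h with fewer than `capacity`
-- distinct elements before its first occurrence
theorem mem_lruKeys_iff (capacity p : Int) (h : List Int) (hcap : 1 ≤ capacity) :
    p ∈ lruKeys capacity h ↔
      p ∈ h ∧ ((PySem.List.dedup (h.takeWhile (fun q => q ≠ p))).length : Int) < capacity := by
  by_cases hp : p ∈ h
  · have hsplit : h = h.takeWhile (fun q => q ≠ p) ++ h.dropWhile (fun q => q ≠ p) :=
      (List.takeWhile_append_dropWhile).symm
    have hne : h.dropWhile (fun q => q ≠ p) ≠ [] := by
      intro hnil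
      have hmem : p ∈ h.takeWhile (fun q => q ≠ p) := by
        rw [hsplit, hnil, List.append_nil] at hp; exact hp
      have := List.mem_takeWhile_imp hmem
      simp at this
    have hhead : (h.dropWhile (fun q => q ≠ p)).head hne = p := by
      have := List.head_dropWhile_not (fun q => decide (q ≠ p)) hne
      simpa using this
    have hdw : h.dropWhile (fun q => q ≠ p) = p :: (h.dropWhile (fun q => q ≠ p)).tail := by
      have h0 := (List.cons_head_tail hne).symm; rw [hhead] at h0; exact h0
    set tw := h.takeWhile (fun q => q ≠ p) with htw
    set t := (h.dropWhile (fun q => q ≠ p)).tail with htt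
    have hh : h = tw ++ p :: t := by rw [hsplit, hdw]
    have hptw : p ∉ tw := by
      intro hmem
      have := List.mem_takeWhile_imp hmem
      simp at this
    have hdd : PySem.List.dedup h =
        PySem.List.dedup tw ++ p ::
          PySem.Set.ofList (t.filter (fun y => !((PySem.List.dedup tw ++ [p]).contains y))) := by
      show PySem.Set.ofList h = _
      rw [hh]
      show List.foldl PySem.Set.add PySem.Set.empty (tw ++ p :: t) = _
      rw [List.foldl_append]
      show List.foldl PySem.Set.add (PySem.Set.ofList tw) (p :: t) = _
      rw [List.foldl_cons]
      have hadd : PySem.Set.add (PySem.Set.ofList tw) p = PySem.List.dedup tw ++ [p] := by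
        unfold PySem.Set.add PySem.Set.contains
        have hc : List.contains (PySem.Set.ofList tw) p = false := by
          rw [List.contains_eq_mem]
          simp only [decide_eq_false_iff_not]
          rw [PySem.Set.mem_ofList]
          exact hptw
        rw [hc]; simp
      rw [hadd, foldl_add_eq_append]
      simp [PySem.List.dedup]
    have hpA : p ∉ PySem.List.dedup tw := by
      rw [PySem.List.dedup, PySem.Set.mem_ofList]; exact hptw
    unfold lruKeys
    rw [hdd, mem_take_middle p _ _ _ hpA]
    constructor
    · intro hlen; exact ⟨hp, by omega⟩
    · intro hcon; rcases hcon with ⟨_, hlen⟩; omega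
  · constructor
    · intro hmem
      exact absurd ((PySem.Set.mem_ofList h p).mp (List.mem_of_mem_take hmem)) hp
    · intro hcon; exact absurd hcon.1 hp

-- B's inner scan, characterized
theorem lruScanBack_eq (p capacity : Int) (h : List Int) (seen : PySem.Set Int) :
    lruScanBack p capacity h seen =
      if p ∈ h ∧ ((PySem.Set.update seen (h.takeWhile (fun q => q ≠ p))).length : Int) < capacity
      then 1 else 0 := by
  induction h generalizing seen with
  | nil => simp [lruScanBack]
  | cons q h IH =>
    by_cases hq : q = p
    · subst hq
      rw [lruScanBack, if_pos rfl]
      have htw : (q :: h).takeWhile (fun r => r ≠ q) = [] := by simp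
      rw [htw]
      simp [PySem.Set.update, PySem.Set.len]
    · rw [lruScanBack, if_neg hq]
      rw [IH (PySem.Set.add seen q)]
      have htw : (q :: h).takeWhile (fun r => r ≠ p) = q :: h.takeWhile (fun r => r ≠ p) := by
        simp [hq]
      rw [htw]
      have hupd : PySem.Set.update seen (q :: h.takeWhile (fun r => r ≠ p)) =
          PySem.Set.update (PySem.Set.add seen q) (h.takeWhile (fun r => r ≠ p)) := by
        simp [PySem.Set.update]
      rw [hupd]
      exact if_congr (by simp [Ne.symm hq]) rfl rfl

theorem lruScanBack_indicator (p capacity : Int) (h : List Int) (hcap : 1 ≤ capacity) :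
    lruScanBack p capacity h PySem.Set.empty = if p ∈ lruKeys capacity h then 1 else 0 := by
  rw [lruScanBack_eq]
  have hup : PySem.Set.update PySem.Set.empty (h.takeWhile (fun q => q ≠ p)) =
      PySem.List.dedup (h.takeWhile (fun q => q ≠ p)) := rfl
  rw [hup]
  exact (if_congr (mem_lruKeys_iff capacity p h hcap) rfl rfl).symm

-- one step of A's loop, on the canonical cache
-- dedup of a cons, filtered form on the right
theorem dedup_cons_filter (x : Int) (l : List Int) :
    PySem.List.dedup (x :: l) = x :: (PySem.List.dedup l).filter (fun y => y ≠ x) := by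
  rw [dedup_cons, dedup_filter_aux l.length l le_rfl]

theorem cache_contains (L : List Int) (p : Int) :
    PySem.Dict.contains (PySem.Dict.mk (L.reverse.map (fun k => (k, true)))) p = decide (p ∈ L) := by
  unfold PySem.Dict.contains
  rw [List.any_map]
  show L.reverse.any (fun k => k == p) = decide (p ∈ L)
  rw [List.any_beq', List.contains_eq_mem]
  simp

theorem cache_insert_fresh (L : List Int) (p : Int) (hp : p ∉ L) :
    (PySem.Dict.mk (L.reverse.map (fun k => (k, true)))).insert p true
      = PySem.Dict.mk ((p :: L).reverse.map (fun k => (k, true))) := by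
  unfold PySem.Dict.insert
  rw [show PySem.Dict.contains (PySem.Dict.mk (L.reverse.map (fun k => (k, true)))) p = false from by
    rw [cache_contains]; simpa using hp]
  simp

theorem cache_erase (L : List Int) (p : Int) :
    (PySem.Dict.mk (L.reverse.map (fun k => (k, true)))).erase p
      = PySem.Dict.mk (((L.filter (fun y => y ≠ p)).reverse.map (fun k => (k, true)))) := by
  unfold PySem.Dict.erase
  congr 1
  show List.filter _ (List.map _ _) = _
  rw [List.filter_map, ← List.filter_reverse]
  congr 1
  apply List.filter_congr
  intro y _
  show (!(y == p)) = decide (y ≠ p)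
  by_cases hy : y = p <;> simp [hy]

theorem lruStep_canonical (capacity : Int) (hcap : 1 ≤ capacity) (h : List Int) (hits p : Int) :
    lruStep capacity (lruCache capacity h, hits) p =
      (lruCache capacity (p :: h), hits + (if p ∈ lruKeys capacity h then 1 else 0)) := by
  have hk1 : 1 ≤ capacity.toNat := by omega
  have hnd : (PySem.List.dedup h).Nodup := PySem.Set.nodup_ofList h
  unfold lruStep
  by_cases hmem : p ∈ lruKeys capacity h
  · have hmem' : p ∈ (PySem.List.dedup h).take capacity.toNat := hmem
    rw [show (lruCache capacity h, hits).1.contains p = true from by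
      rw [lruCache, cache_contains]; simpa using hmem]
    rw [if_pos rfl, if_pos hmem]
    have herase : (lruCache capacity h, hits).1.erase p
        = PySem.Dict.mk (((lruKeys capacity h).filter (fun y => y ≠ p)).reverse.map (fun k => (k, true))) :=
      cache_erase _ p
    rw [herase, cache_insert_fresh _ p (by simp)]
    have hK : lruKeys capacity (p :: h) = p :: (lruKeys capacity h).filter (fun y => y ≠ p) := by
      unfold lruKeys
      rw [dedup_cons_filter]
      rw [show capacity.toNat = (capacity.toNat - 1) + 1 from by omega, List.take_succ_cons]
      rw [take_filter_of_mem_take p _ _ hnd hmem', Nat.sub_add_cancel hk1]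
    simp only [lruCache, hK]
  · rw [show (lruCache capacity h, hits).1.contains p = false from by
      rw [lruCache, cache_contains]; simpa using hmem]
    rw [if_neg (by simp), if_neg hmem, add_zero]
    have hsize : ((lruCache capacity h, hits).1.size : Int)
        = ((min capacity.toNat (PySem.List.dedup h).length : Nat) : Int) := by
      simp [lruCache, PySem.Dict.size, lruKeys]
    by_cases hfull : capacity ≤ ((lruCache capacity h, hits).1.size : Int)
    · rw [if_pos hfull]
      rw [hsize] at hfull
      have hDlen : capacity.toNat ≤ (PySem.List.dedup h).length := by omega
      have hp1 : p ∉ (PySem.List.dedup h).take (capacity.toNat - 1) := by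
        intro hpmem
        apply hmem
        show p ∈ (PySem.List.dedup h).take capacity.toNat
        have heq : (PySem.List.dedup h).take (capacity.toNat - 1)
            = ((PySem.List.dedup h).take capacity.toNat).take (capacity.toNat - 1) := by
          rw [List.take_take]; congr 1; omega
        rw [heq] at hpmem
        exact List.mem_of_mem_take hpmem
      have hKsplit : lruKeys capacity h
          = (PySem.List.dedup h).take (capacity.toNat - 1)
            ++ [(PySem.List.dedup h)[capacity.toNat - 1]'(by omega)] := by
        have hsp := List.take_add_one (l := PySem.List.dedup h) (i := capacity.toNat - 1)
        rw [Nat.sub_add_cancel hk1] at hsp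
        unfold lruKeys
        rw [hsp, List.getElem?_eq_getElem (by omega)]
        rfl
      have htail : (lruCache capacity h, hits).1.items.tail
          = ((PySem.List.dedup h).take (capacity.toNat - 1)).reverse.map (fun k => (k, true)) := by
        show ((lruKeys capacity h).reverse.map (fun k => (k, true))).tail = _
        rw [hKsplit, List.reverse_append]
        simp only [List.reverse_singleton, List.singleton_append, List.map_cons, List.tail_cons]
      rw [htail, cache_insert_fresh _ p hp1]
      have hK : lruKeys capacity (p :: h) = p :: (PySem.List.dedup h).take (capacity.toNat - 1) := by
        unfold lruKeys
        rw [dedup_cons_filter]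
        rw [show capacity.toNat = (capacity.toNat - 1) + 1 from by omega, List.take_succ_cons]
        congr 1
        apply take_filter_of_not_mem_take p _ _ hp1
      simp only [lruCache, hK]
    · rw [if_neg hfull]
      rw [hsize] at hfull
      have hDlt : (PySem.List.dedup h).length < capacity.toNat := by omega
      have hKD : lruKeys capacity h = PySem.List.dedup h := by
        unfold lruKeys; exact List.take_of_length_le (by omega)
      have hph : p ∉ PySem.List.dedup h := by rw [← hKD]; exact hmem
      rw [show lruCache capacity h
          = PySem.Dict.mk ((PySem.List.dedup h).reverse.map (fun k => (k, true))) from by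
        rw [lruCache, hKD]]
      rw [cache_insert_fresh _ p hph]
      have hK : lruKeys capacity (p :: h) = p :: PySem.List.dedup h := by
        unfold lruKeys
        rw [dedup_cons_filter]
        rw [show capacity.toNat = (capacity.toNat - 1) + 1 from by omega, List.take_succ_cons]
        congr 1
        rw [List.filter_eq_self.mpr (by
          intro y hy
          simp only [ne_eq, decide_eq_true_eq]
          intro he; subst he; exact hph hy)]
        exact List.take_of_length_le (by omega)
      simp only [lruCache, hK]

theorem A_main (capacity : Int) (hcap : 1 ≤ capacity) :
    ∀ (rest h : List Int) (hits : Int),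
      (rest.foldl (lruStep capacity) (lruCache capacity h, hits)).2 =
        hits + lruCnt capacity h rest := by
  intro rest
  induction rest with
  | nil => intro h hits; simp [lruCnt]
  | cons p rest IH =>
    intro h hits
    rw [List.foldl_cons, lruStep_canonical capacity hcap h hits p, IH (p :: h)]
    rw [lruCnt]
    ring

theorem B_main (capacity : Int) (hcap : 1 ≤ capacity) :
    ∀ (rest pre : List Int) (hits : Int),
      (PySem.List.enumerate rest (pre.length : Int)).foldl
        (fun hits ip =>
          hits + lruScanBack ip.2 capacity
            (PySem.List.slice (pre ++ rest) none (some ip.1)).reverse PySem.Set.empty) hits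
      = hits + lruCnt capacity pre.reverse rest := by
  intro rest
  induction rest with
  | nil => intro pre hits; simp [lruCnt, PySem.List.enumerate]
  | cons p rest IH =>
    intro pre hits
    rw [PySem.List.enumerate_cons, List.foldl_cons]
    have hsl : PySem.List.slice (pre ++ p :: rest) none (some (pre.length : Int)) = pre := by
      rw [PySem.List.slice_to_natCast, List.take_left]
    have hassoc : pre ++ p :: rest = (pre ++ [p]) ++ rest := by simp
    have hlen : (pre.length : Int) + 1 = ((pre ++ [p]).length : Int) := by simp
    rw [hsl]
    rw [hassoc, hlen, IH (pre ++ [p])]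
    rw [lruScanBack_indicator p capacity pre.reverse hcap]
    rw [lruCnt]
    have hrev : (pre ++ [p]).reverse = p :: pre.reverse := by simp
    rw [hrev]
    ring

-- ===== VERDICT (by name: the statement is the Claim_ definition above) =====
theorem lru_hits_spec : Claim_equal_lru_hits := by
  intro pages capacity _ hpre
  unfold Spec_lru_hits
  rcases hpre with hcap | hnil
  · have hA : lru_hits pages capacity = lruCnt capacity [] pages := by
      have := A_main capacity hcap pages [] 0
      simpa [lru_hits, lruCache, lruKeys, PySem.List.dedup, PySem.Set.ofList, PySem.Dict.empty] using this
    have hB : lru_hits_alt pages capacity = lruCnt capacity [] pages := by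
      have := B_main capacity hcap pages [] 0
      simpa [lru_hits_alt] using this
    rw [hA, hB]
  · subst hnil; rfl

theorem lru_hits_raises : Claim_raises_lru_hits := by
  unfold Claim_raises_lru_hits
  constructor
  · intro pages capacity _ hr
    unfold Raises_lru_hits at hr
    unfold Pre_lru_hits
    push Not
    exact ⟨by omega, hr.2⟩
  · exact ⟨by decide, by decide, by decide⟩

-- the concrete half of the raises claim, pinned as its own fact
theorem lru_hits_raises_witness_ok :
    lru_hits_alt pvRaiseWitness_lru_hits.1 pvRaiseWitness_lru_hits.2 = pvRaiseWitnessOut_lru_hits :=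
  lru_hits_raises.2.2.2
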